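-- pv_equiv track=rewrite | github.com/hamida-mstafa/assessments | python/board.py | solution
-- ===== SOURCE A (Python) =====
-- def solution(A):
--     N = len(A)
--
--     if N == 1:
--         return 1
--
--     A.sort()
--
--     def is_possible(board_length):
--         last_position = A[0]
--         boards_count = 1
--
--         for position in A:
--             if position - last_position > board_length:
--                 last_position = position
--                 boards_count += 1
--
--         return boards_count
--
--     lower_bound, upper_bound = 1, A[-1] - A[0]
--
--     while lower_bound <= upper_bound:
--         mid = (lower_bound + upper_bound) // 2
--
--         if is_possible(mid) <= 2:
--             upper_bound = mid - 1
--         else: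
--             lower_bound = mid + 1
--
--     return lower_bound
-- ===== SOURCE B (Python) =====
-- def solution(A):
--     # Sorts A in place, like the original.
--     A.sort()
--     n = len(A)
--     if n == 1:
--         return 1
--     lo, hi = A[0], A[-1]
--     best = min(max(p - lo, hi - q) for p, q in zip(A, A[1:]))
--     return max(1, best)
-- ===== Notes on version B (the rewrite author's own statement) =====
-- stated objective: faster
-- what changed: Replaces the binary search over candidate board lengths (each step re-running the greedy counting pass over the sorted list) with a single linear scan after sorting: the answer is max(1, min over adjacent split points of max(left span, right span)).
import Mathlib
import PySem

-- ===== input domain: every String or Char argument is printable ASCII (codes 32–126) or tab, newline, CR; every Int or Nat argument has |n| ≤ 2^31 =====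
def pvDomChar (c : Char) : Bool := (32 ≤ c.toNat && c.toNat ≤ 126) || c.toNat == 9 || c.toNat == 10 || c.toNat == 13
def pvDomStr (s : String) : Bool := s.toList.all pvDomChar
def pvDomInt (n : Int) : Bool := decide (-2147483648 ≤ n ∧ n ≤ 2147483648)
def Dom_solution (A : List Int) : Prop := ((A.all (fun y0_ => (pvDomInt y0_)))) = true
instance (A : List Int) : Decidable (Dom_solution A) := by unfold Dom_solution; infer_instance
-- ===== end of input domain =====

-- B replaces A's binary search (greedy feasibility re-scan per step) by one linear scan over
-- adjacent split points after sorting; like A, B sorts the argument list in place (return-value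
-- equivalence is what is proved here).


-- ===== PORT A =====
-- one step of the `for position in A` loop of is_possible: state = (last_position, boards_count)
def pvStep (L : Int) (st : Int × Int) (p : Int) : Int × Int :=
  if p - st.1 > L then (p, st.2 + 1) else st

-- is_possible(board_length) over the (already sorted) list S; S = [] is unreachable
-- (Python raises IndexError on `A[-1]` before is_possible is ever called)
def pvIsPossible (S : List Int) (L : Int) : Int :=
  match S with
  | [] => 1
  | a :: _ => (S.foldl (pvStep L) (a, 1)).2

-- the `while lower_bound <= upper_bound` binary-search loop
def pvBS (S : List Int) (lb ub : Int) : Int :=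
  if h : lb ≤ ub then
    let mid := PySem.Int.floordiv (lb + ub) 2
    if pvIsPossible S mid ≤ 2 then pvBS S lb (mid - 1) else pvBS S (mid + 1) ub
  else lb
termination_by (ub + 1 - lb).toNat
decreasing_by
  · have := PySem.Int.floordiv_two_mid_bounds h; omega
  · have := PySem.Int.floordiv_two_mid_bounds h; omega

def solution (A : List Int) : Int :=
  if PySem.List.len A = 1 then 1
  else
    let S := PySem.List.sorted A (fun x => x) false
    -- A[-1] - A[0]; default 0 unreachable under Pre_ (Python raises IndexError on [])
    pvBS S 1 (PySem.List.pyGetD S (-1) 0 - PySem.List.pyGetD S 0 0)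

-- ===== PORT B =====
-- candidates max(p - lo, hi - q) for adjacent pairs (p, q) = zip(A, A[1:])
def pvCands (lo hi : Int) (S : List Int) : List Int :=
  (S.zip S.tail).map (fun pq => max (pq.1 - lo) (hi - pq.2))

def solution_alt (A : List Int) : Int :=
  let S := PySem.List.sorted A (fun x => x) false
  match S with
  | [] => 0          -- unreachable: Python raises IndexError on the empty list
  | [_] => 1
  | a :: l =>
      let m := PySem.List.pyGetD (a :: l) (-1) 0
      max 1 ((PySem.List.min? (pvCands a m (a :: l)) (fun x => x)).getD 0)

-- ===== PRECONDITION & SPEC =====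
-- Pre_ excludes only the empty list, on which the Python A raises IndexError (A[-1]).
def Pre_solution (A : List Int) : Prop := A ≠ []
instance (A : List Int) : Decidable (Pre_solution A) := by unfold Pre_solution; infer_instance
def pvWitness_solution : List Int := [3, 1, 7]

def Spec_solution (A : List Int) (out : Int) : Prop := out = solution_alt A
instance (A : List Int) (out : Int) : Decidable (Spec_solution A out) := by unfold Spec_solution; infer_instance

-- ===== CLAIM (what is proved, stated in full; the proofs are below) =====
def Claim_equal_solution : Prop := ∀ (A : List Int), Dom_solution A → Pre_solution A → Spec_solution A (solution A)

-- ===== LEMMAS AND PROOFS =====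

-- the boards_count accumulator never decreases
lemma foldl_step_snd_ge (L : Int) (l : List Int) (st : Int × Int) :
    st.2 ≤ (l.foldl (pvStep L) st).2 := by
  induction l generalizing st with
  | nil => simp
  | cons p l ih =>
      refine le_trans ?_ (ih (pvStep L st p))
      unfold pvStep; split <;> simp

-- if no element is further than L from the anchor, the state is unchanged
lemma foldl_step_noreset (L last c : Int) (l : List Int)
    (h : ∀ x ∈ l, x - last ≤ L) :
    l.foldl (pvStep L) (last, c) = (last, c) := by
  induction l with
  | nil => rfl
  | cons p l ih =>
      have hp : ¬ (p - last > L) := by have := h p (by simp); omega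
      simp only [List.foldl_cons, pvStep, hp, if_false]
      exact ih (fun x hx => h x (by simp [hx]))

-- once an element resets the anchor, the count strictly grows
lemma foldl_step_reset (L : Int) (l : List Int) :
    ∀ (last c : Int), (∃ x ∈ l, x - last > L) →
      c + 1 ≤ (l.foldl (pvStep L) (last, c)).2 := by
  induction l with
  | nil => intro last c h; simp at h
  | cons p l ih =>
      intro last c h
      by_cases hp : p - last > L
      · simp only [List.foldl_cons, pvStep, hp, if_true]
        have := foldl_step_snd_ge L l (p, c + 1); simpa using this
      · simp only [List.foldl_cons, pvStep, hp, if_false]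
        rcases h with ⟨x, hx, hxg⟩
        rcases List.mem_cons.mp hx with rfl | hx'
        · omega
        · exact ih last c ⟨x, hx', hxg⟩

-- the count stays ≤ c iff no element resets the anchor
lemma foldl_step_le_iff (L last c : Int) (l : List Int) :
    (l.foldl (pvStep L) (last, c)).2 ≤ c ↔ ∀ x ∈ l, x - last ≤ L := by
  constructor
  · intro hle x hx
    by_contra hgt
    have := foldl_step_reset L l last c ⟨x, hx, by omega⟩
    omega
  · intro h; rw [foldl_step_noreset L last c l h]

-- the last element of a ≤-sorted list bounds every element
lemma le_getLast_of_pairwise (l : List Int) (hp : l.Pairwise (· ≤ ·)) (hl : l ≠ []) :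
    ∀ x ∈ l, x ≤ l.getLast hl := by
  induction l with
  | nil => simp
  | cons a t ih =>
      intro x hx
      rcases List.pairwise_cons.mp hp with ⟨ha, ht⟩
      cases t with
      | nil => simp at hx; simp [hx]
      | cons b t' =>
          rw [List.getLast_cons (by simp)]
          rcases List.mem_cons.mp hx with rfl | hx'
          · exact ha _ (List.getLast_mem _)
          · exact ih ht (by simp) x hx'

-- for a sorted nonempty tail l with last element m, the greedy count from (a,1) is ≤ 2
-- exactly when some adjacent split (p,q) of a :: l has p - a ≤ L and m - q ≤ L
lemma mainIff (L : Int) (hL : 0 ≤ L) :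
    ∀ (l : List Int) (a m : Int), (a :: l).Pairwise (· ≤ ·) → (hl : l ≠ []) →
      l.getLast hl = m →
      ((l.foldl (pvStep L) (a, 1)).2 ≤ 2 ↔
        ∃ pq ∈ (a :: l).zip l, pq.1 - a ≤ L ∧ m - pq.2 ≤ L) := by
  intro l
  induction l with
  | nil => intro a m _ hl; exact absurd rfl hl
  | cons y t ih =>
    intro a m hp hl hm
    rcases List.pairwise_cons.mp hp with ⟨haAll, hp1⟩
    rcases List.pairwise_cons.mp hp1 with ⟨hyAll, hpt⟩
    cases t with
    | nil =>
        have hm2 : y = m := by simpa using hm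
        constructor
        · intro _; exact ⟨(a, y), by simp, by omega, by omega⟩
        · intro _
          simp only [List.foldl_cons, List.foldl_nil, pvStep]
          split <;> simp
    | cons y' t' =>
        have htne : (y' :: t') ≠ [] := by simp
        have hm' : (y' :: t').getLast htne = m := by
          rw [← hm, List.getLast_cons htne]
        -- elements of y' :: t' are bounded by m
        have hbnd : ∀ x ∈ y' :: t', x ≤ m := by
          have := le_getLast_of_pairwise (y' :: t') hpt htne
          rw [hm'] at this; exact this
        have hmMem : m ∈ y' :: t' := hm' ▸ List.getLast_mem htne
        by_cases hy : y - a > L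
        · -- y resets the anchor: second board starts at y, must reach m
          have hstep : pvStep L (a, 1) y = (y, 2) := by simp [pvStep, hy]
          have hfold : (y :: y' :: t').foldl (pvStep L) (a, 1) =
              (y' :: t').foldl (pvStep L) (y, 2) := by
            rw [List.foldl_cons, hstep]
          rw [hfold]
          have hiff := foldl_step_le_iff L y 2 (y' :: t')
          constructor
          · intro hle
            refine ⟨(a, y), by simp, by omega, ?_⟩
            have := (hiff.mp hle) m hmMem; omega
          · rintro ⟨⟨p, q⟩, hmem, h1, h2⟩
            rcases List.mem_cons.mp hmem with heq | hmem'
            · -- the pair (a, y): no element of y' :: t' is further than L from y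
              have hay : q = y := by simpa using congrArg Prod.snd heq
              refine hiff.mpr (fun x hx => ?_)
              have := hbnd x hx; omega
            · -- any later pair has p ≥ y, contradicting p - a ≤ L
              have hpm : p ∈ y :: y' :: t' := (List.of_mem_zip hmem').1
              have : y ≤ p := by
                rcases List.mem_cons.mp hpm with rfl | hpm'
                · exact le_refl _
                · exact hyAll p hpm'
              omega
        · -- y stays on the first board: reduce to the tail via the IH
          have hstep : pvStep L (a, 1) y = (a, 1) := by simp [pvStep, hy]
          have hfold : (y :: y' :: t').foldl (pvStep L) (a, 1) =
              (y' :: t').foldl (pvStep L) (a, 1) := by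
            rw [List.foldl_cons, hstep]
          rw [hfold]
          have hpw : (a :: y' :: t').Pairwise (· ≤ ·) :=
            List.pairwise_cons.mpr ⟨fun b hb => haAll b (List.mem_cons_of_mem _ hb), hpt⟩
          rw [ih a m hpw htne hm']
          have hyy' : y ≤ y' := hyAll y' (by simp)
          constructor
          · rintro ⟨⟨p, q⟩, hmem, h1, h2⟩
            rcases List.mem_cons.mp hmem with heq | hmem'
            · have hq : q = y' := by simpa using congrArg Prod.snd heq
              exact ⟨(y, y'), by simp, by omega, by omega⟩
            · refine ⟨(p, q), ?_, h1, h2⟩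
              simp only [List.zip_cons_cons]
              exact List.mem_cons_of_mem _ (List.mem_cons_of_mem _ hmem')
          · rintro ⟨⟨p, q⟩, hmem, h1, h2⟩
            rcases List.mem_cons.mp hmem with heq | hmem'
            · -- (a, y) : move to (a, y') since y ≤ y'
              have hq : q = y := by simpa using congrArg Prod.snd heq
              exact ⟨(a, y'), by simp, by omega, by omega⟩
            · rcases List.mem_cons.mp hmem' with heq2 | hmem''
              · have hq : q = y' := by simpa using congrArg Prod.snd heq2
                exact ⟨(a, y'), by simp, by omega, by omega⟩
              · exact ⟨(p, q), List.mem_cons_of_mem _ hmem'', h1, h2⟩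


-- binary search returns max 1 T when feasibility is exactly T ≤ L on [1, ∞)
lemma pvBS_eq (S : List Int) (T : Int)
    (hchar : ∀ L, 1 ≤ L → (pvIsPossible S L ≤ 2 ↔ T ≤ L)) :
    ∀ (n : Nat) (lb ub : Int), (ub + 1 - lb).toNat = n → 1 ≤ lb →
      lb ≤ max 1 T → max 1 T ≤ ub + 1 → pvBS S lb ub = max 1 T := by
  intro n
  induction n using Nat.strong_induction_on with
  | _ n ih =>
    intro lb ub hn h1 hlo hhi
    rw [pvBS]
    by_cases hle : lb ≤ ub
    · rw [dif_pos hle]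
      have hb := PySem.Int.floordiv_two_mid_bounds hle
      set mid := PySem.Int.floordiv (lb + ub) 2 with hmid
      have h1m : 1 ≤ mid := by omega
      by_cases hpos : pvIsPossible S mid ≤ 2
      · rw [if_pos hpos]
        have hT : T ≤ mid := (hchar mid h1m).mp hpos
        exact ih ((mid - 1) + 1 - lb).toNat (by omega) lb (mid - 1) rfl h1 hlo (by omega)
      · rw [if_neg hpos]
        have hT : ¬ T ≤ mid := fun h => hpos ((hchar mid h1m).mpr h)
        exact ih (ub + 1 - (mid + 1)).toNat (by omega) (mid + 1) ub rfl (by omega)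
          (by omega) hhi
    · rw [dif_neg hle]; omega

-- ===== VERDICT (by name: the statement is the Claim_ definition above) =====
theorem solution_spec : Claim_equal_solution := by
  intro A _ hpre
  unfold Spec_solution solution solution_alt
  have hSne : PySem.List.sorted A (fun x => x) false ≠ [] := by
    intro h; exact hpre ((PySem.List.sorted_eq_nil_iff A (fun x => x) false).mp h)
  have hlen : (PySem.List.sorted A (fun x => x) false).length = A.length :=
    PySem.List.length_sorted ..
  by_cases h1 : PySem.List.len A = 1
  · rw [if_pos h1]
    have hl1 : (PySem.List.sorted A (fun x => x) false).length = 1 := by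
      rw [hlen]
      have := PySem.List.len_eq A
      omega
    obtain ⟨x, hx⟩ := List.length_eq_one_iff.mp hl1
    rw [hx]
  · rw [if_neg h1]
    have hl2 : 2 ≤ (PySem.List.sorted A (fun x => x) false).length := by
      rw [hlen]
      have hA1 : 1 ≤ A.length := List.length_pos_iff.mpr hpre
      have := PySem.List.len_eq A
      by_contra hc
      have : A.length = 1 := by omega
      simp [PySem.List.len_eq, this] at h1
    rcases hSeq : PySem.List.sorted A (fun x => x) false with _ | ⟨a, _ | ⟨y, t⟩⟩
    · exact absurd hSeq hSne
    · rw [hSeq] at hl2; simp at hl2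
    · -- S = a :: y :: t, the main case
      dsimp only
      have hsorted : (a :: y :: t).Pairwise (· ≤ ·) := by
        have := PySem.List.sorted_pairwise A (fun x => x) (κ := Int)
        rw [hSeq] at this; exact this
      rcases List.pairwise_cons.mp hsorted with ⟨haAll, hsorted1⟩
      -- the maximum m = S[-1]
      have hglne : (a :: y :: t) ≠ [] := by simp
      set m := (a :: y :: t).getLast hglne with hmdef
      have hgd : PySem.List.pyGetD (a :: y :: t) (-1) 0 = m :=
        PySem.List.pyGetD_neg_one (a :: y :: t) 0 hglne
      have hgd0 : PySem.List.pyGetD (a :: y :: t) 0 0 = a :=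
        PySem.List.pyGetD_zero_cons ..
      rw [hgd, hgd0]
      have hbnd : ∀ x ∈ a :: y :: t, x ≤ m :=
        le_getLast_of_pairwise _ hsorted hglne
      have ham : a ≤ m := hbnd a (by simp)
      have hay : a ≤ y := haAll y (by simp)
      have hmtail : (y :: t).getLast (by simp) = m := by
        rw [hmdef]; exact (List.getLast_cons (by simp)).symm
      -- the candidate list and its minimum T
      have hcne : pvCands a m (a :: y :: t) ≠ [] := by simp [pvCands]
      obtain ⟨T, hT⟩ : ∃ T, PySem.List.min? (pvCands a m (a :: y :: t)) (fun x => x) = some T := by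
        rcases hh : PySem.List.min? (pvCands a m (a :: y :: t)) (fun x => x) with _ | T
        · exact absurd ((PySem.List.min?_eq_none_iff _ _).mp hh) hcne
        · exact ⟨T, rfl⟩
      have hTmem := PySem.List.min?_mem hT
      have hTmin := PySem.List.min?_isMin hT
      -- T ≤ L iff some candidate is ≤ L
      have hTiff : ∀ L : Int, (T ≤ L ↔ ∃ pq ∈ (a :: y :: t).zip (y :: t),
          pq.1 - a ≤ L ∧ m - pq.2 ≤ L) := by
        intro L
        constructor
        · intro hTL
          have hTmem' : T ∈ ((a :: y :: t).zip (y :: t)).map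
              (fun pq => max (pq.1 - a) (m - pq.2)) := by
            simpa only [pvCands, List.tail_cons] using hTmem
          rcases List.mem_map.mp hTmem' with ⟨pq, hpq, hTeq⟩
          rw [← hTeq] at hTL
          exact ⟨pq, hpq, le_trans (le_max_left _ _) hTL,
            le_trans (le_max_right _ _) hTL⟩
        · rintro ⟨pq, hpq, h1', h2'⟩
          have hc : max (pq.1 - a) (m - pq.2) ∈ pvCands a m (a :: y :: t) := by
            simp only [pvCands]
            exact List.mem_map_of_mem hpq
          have := hTmin _ hc
          exact le_trans this (max_le h1' h2')
      -- feasibility characterization for the binary search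
      have hchar : ∀ L, 1 ≤ L → (pvIsPossible (a :: y :: t) L ≤ 2 ↔ T ≤ L) := by
        intro L hL1
        have hL0 : (0 : Int) ≤ L := by omega
        have hstep0 : pvStep L (a, 1) a = (a, 1) := by simp [pvStep]; omega
        have hred : pvIsPossible (a :: y :: t) L = ((y :: t).foldl (pvStep L) (a, 1)).2 := by
          simp only [pvIsPossible, List.foldl_cons, hstep0]
        rw [hred, mainIff L hL0 (y :: t) a m hsorted (by simp) hmtail, hTiff]
      -- bound T ≤ m - a via the first candidate
      have hTub : T ≤ m - a := by
        have hmy : m - y ≤ m - a := by omega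
        have hc0 : max (a - a) (m - y) ∈ pvCands a m (a :: y :: t) := by
          simp [pvCands]
        have := hTmin _ hc0
        simp only at this
        have : T ≤ max (a - a) (m - y) := this
        have h0 : (0:Int) ≤ m - a := by omega
        rcases max_cases (a - a) (m - y) with ⟨he, _⟩ | ⟨he, _⟩ <;> omega
      rw [pvBS_eq (a :: y :: t) T hchar ((m - a) + 1 - 1).toNat 1 (m - a) rfl
        (le_refl 1) (le_max_left 1 T) (by omega), hT]
      rfl
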